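-- pv_equiv track=rewrite | github.com/dongyang-mt/pytorch3d | setup_musa.py | get_existing_ccbin
-- ===== SOURCE A (Python) =====
-- from typing import List, Optional
--
-- def get_existing_ccbin(nvcc_args: List[str]) -> Optional[str]:
--     """
--     Given a list of nvcc arguments, return the compiler if specified.
--
--     Note from CUDA doc: Single value options and list options must have
--     arguments, which must follow the name of the option itself by either
--     one of more spaces or an equals character.
--     """
--     last_arg = None
--     for arg in reversed(nvcc_args):
--         if arg == "-ccbin":
--             return last_arg
--         if arg.startswith("-ccbin="):
--             return arg[7:]
--         last_arg = arg
--     return None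
-- ===== SOURCE B (Python) =====
-- from typing import List, Optional
--
-- def get_existing_ccbin(nvcc_args: List[str]) -> Optional[str]:
--     result = None
--     for i, arg in enumerate(nvcc_args):
--         if arg == "-ccbin":
--             result = nvcc_args[i + 1] if i + 1 < len(nvcc_args) else None
--         elif arg.startswith("-ccbin="):
--             result = arg[7:]
--     return result
-- ===== Notes on version B (the rewrite author's own statement) =====
-- stated objective: alternative
-- what changed: Replaced the reversed-iteration with early return and a trailing last_arg variable by a single forward pass over enumerate(nvcc_args) that keeps the last match in an accumulator, reading the compiler name by index nvcc_args[i+1] instead of remembering the previous element.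
import Mathlib
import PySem

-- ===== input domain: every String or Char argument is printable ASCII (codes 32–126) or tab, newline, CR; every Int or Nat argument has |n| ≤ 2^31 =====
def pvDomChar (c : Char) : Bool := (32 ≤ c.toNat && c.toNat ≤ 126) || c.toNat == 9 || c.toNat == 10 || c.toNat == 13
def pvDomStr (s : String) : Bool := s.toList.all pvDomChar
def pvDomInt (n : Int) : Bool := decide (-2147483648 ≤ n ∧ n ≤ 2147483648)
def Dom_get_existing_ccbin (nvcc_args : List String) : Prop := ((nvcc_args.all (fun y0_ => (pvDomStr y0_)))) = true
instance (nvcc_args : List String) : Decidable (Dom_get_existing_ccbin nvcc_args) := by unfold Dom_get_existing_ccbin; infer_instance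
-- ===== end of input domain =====

-- B replaces A's reversed scan with early return by one forward pass keeping the last match (alternative decomposition, same cost).

-- ===== PORT A =====
-- the 'for arg in reversed(nvcc_args)' loop with the last_arg trailing variable and early returns
def getCcbinRev : List String → Option String → Option String
  | [], _ => none
  | arg :: rest, last_arg =>
    if arg == "-ccbin" then last_arg
    else if PySem.Str.startswith arg "-ccbin=" then some (PySem.Str.slice arg (some 7) none)
    else getCcbinRev rest (some arg)

def get_existing_ccbin (nvcc_args : List String) : Option String :=
  getCcbinRev nvcc_args.reverse none

-- ===== PORT B =====
def get_existing_ccbin_alt (nvcc_args : List String) : Option String :=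
  (PySem.List.enumerate nvcc_args 0).foldl
    (fun result p =>
      if p.2 == "-ccbin" then
        (if p.1 + 1 < (nvcc_args.length : Int) then PySem.List.pyGet? nvcc_args (p.1 + 1) else none)
      else if PySem.Str.startswith p.2 "-ccbin=" then some (PySem.Str.slice p.2 (some 7) none)
      else result)
    none

-- ===== PRECONDITION & SPEC =====
def Spec_get_existing_ccbin (nvcc_args : List String) (out : Option String) : Prop := out = get_existing_ccbin_alt nvcc_args
instance (nvcc_args : List String) (out : Option String) : Decidable (Spec_get_existing_ccbin nvcc_args out) := by unfold Spec_get_existing_ccbin; infer_instance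

-- ===== CLAIM (what is proved, stated in full; the proofs are below) =====
def Claim_equal_get_existing_ccbin : Prop := ∀ (nvcc_args : List String), Dom_get_existing_ccbin nvcc_args → Spec_get_existing_ccbin nvcc_args (get_existing_ccbin nvcc_args)

-- ===== LEMMAS AND PROOFS =====

-- whether an argument is a compiler specification
def ccbinHit (a : String) : Bool := a == "-ccbin" || PySem.Str.startswith a "-ccbin="

-- the answer determined by the first n arguments, scanning from the end
def ccbinSpec (ctx : List String) : Nat → Option String
  | 0 => none
  | n+1 =>
    match ctx[n]? with
    | none => none
    | some a =>
      if a == "-ccbin" then ctx[n+1]?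
      else if PySem.Str.startswith a "-ccbin=" then some (PySem.Str.slice a (some 7) none)
      else ccbinSpec ctx n

theorem getCcbinRev_eq (ctx : List String) :
    ∀ n, n ≤ ctx.length → getCcbinRev ((ctx.take n).reverse) ctx[n]? = ccbinSpec ctx n := by
  intro n
  induction n with
  | zero => intro _; simp [getCcbinRev, ccbinSpec]
  | succ n ih =>
    intro h
    have hn : n < ctx.length := by omega
    have htake : (ctx.take (n+1)).reverse = ctx[n] :: (ctx.take n).reverse := by
      rw [List.take_add_one]
      simp [List.getElem?_eq_getElem hn]
    rw [htake]
    simp only [getCcbinRev, ccbinSpec, List.getElem?_eq_getElem hn]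
    by_cases h1 : (ctx[n] == "-ccbin") = true
    · rw [if_pos h1, if_pos h1]
    · rw [if_neg h1, if_neg h1]
      by_cases h2 : PySem.Str.startswith ctx[n] "-ccbin=" = true
      · rw [if_pos h2, if_pos h2]
      · rw [if_neg h2, if_neg h2, ← List.getElem?_eq_getElem hn]
        exact ih (by omega)

theorem portA_eq (ctx : List String) : get_existing_ccbin ctx = ccbinSpec ctx ctx.length := by
  have := getCcbinRev_eq ctx ctx.length (le_refl _)
  simpa [get_existing_ccbin, List.getElem?_eq_none (le_refl ctx.length)] using this

theorem ccbinSpec_none (ctx : List String) :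
    ∀ n, (ctx.take n).any ccbinHit = false → ccbinSpec ctx n = none := by
  intro n
  induction n with
  | zero => intro _; simp [ccbinSpec]
  | succ n ih =>
    intro h
    by_cases hn : n < ctx.length
    · have htake : ctx.take (n+1) = ctx.take n ++ [ctx[n]] := by
        rw [List.take_add_one]; simp [List.getElem?_eq_getElem hn]
      rw [htake] at h
      simp only [List.any_append, List.any_cons, List.any_nil, Bool.or_eq_false_iff] at h
      have hhit : ccbinHit ctx[n] = false := h.2.1
      simp only [ccbinHit, Bool.or_eq_false_iff] at hhit
      simp only [ccbinSpec, List.getElem?_eq_getElem hn]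
      rw [if_neg (by rw [hhit.1]; exact Bool.false_ne_true), if_neg (by rw [hhit.2]; exact Bool.false_ne_true)]
      exact ih h.1
    · simp [ccbinSpec, List.getElem?_eq_none (by omega : ctx.length ≤ n)]

theorem foldB_eq (ctx : List String) :
    ∀ n, n ≤ ctx.length → ∀ acc : Option String,
      ((PySem.List.enumerate ctx 0).take n).foldl
        (fun result p =>
          if p.2 == "-ccbin" then
            (if p.1 + 1 < (ctx.length : Int) then PySem.List.pyGet? ctx (p.1 + 1) else none)
          else if PySem.Str.startswith p.2 "-ccbin=" then some (PySem.Str.slice p.2 (some 7) none)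
          else result) acc
      = if (ctx.take n).any ccbinHit then ccbinSpec ctx n else acc := by
  intro n
  induction n with
  | zero => intro _ acc; rfl
  | succ n ih =>
    intro h acc
    have hn : n < ctx.length := by omega
    have hen : (PySem.List.enumerate ctx 0).take (n+1)
        = (PySem.List.enumerate ctx 0).take n ++ [((n : Int), ctx[n])] := by
      rw [List.take_add_one]
      have : (PySem.List.enumerate ctx 0)[n]? = some ((n : Int), ctx[n]) := by
        rw [PySem.List.getElem?_enumerate]
        simp [List.getElem?_eq_getElem hn]
      simp [this]
    have htake : ctx.take (n+1) = ctx.take n ++ [ctx[n]] := by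
      rw [List.take_add_one]; simp [List.getElem?_eq_getElem hn]
    rw [hen, List.foldl_append, ih (by omega) acc, htake]
    simp only [List.foldl_cons, List.foldl_nil, List.any_append, List.any_cons, List.any_nil]
    by_cases h1 : (ctx[n] == "-ccbin") = true
    · rw [if_pos h1]
      have hv : (if ((n : Int)) + 1 < (ctx.length : Int) then PySem.List.pyGet? ctx ((n : Int) + 1) else none)
          = ctx[n+1]? := by
        by_cases hlt : n + 1 < ctx.length
        · rw [if_pos (by exact_mod_cast Nat.cast_lt.mpr hlt)]
          have h0 : PySem.List.pyGet? ctx (((n+1 : Nat) : Int)) = ctx[n+1]? := PySem.List.pyGet?_natCast ctx (n+1)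
          simpa [Nat.cast_add] using h0
        · rw [if_neg (by omega), List.getElem?_eq_none (by omega : ctx.length ≤ n + 1)]
      rw [hv]
      have hhit : ccbinHit ctx[n] = true := by simp [ccbinHit, h1]
      rw [if_pos (by simp [hhit])]
      simp only [ccbinSpec, List.getElem?_eq_getElem hn]
      rw [if_pos h1]
    · rw [if_neg h1]
      by_cases h2 : PySem.Str.startswith ctx[n] "-ccbin=" = true
      · rw [if_pos h2]
        have hhit : ccbinHit ctx[n] = true := by simp only [ccbinHit, h2, Bool.or_true]
        rw [if_pos (by simp [hhit])]
        simp only [ccbinSpec, List.getElem?_eq_getElem hn]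
        rw [if_neg h1, if_pos h2]
      · rw [if_neg h2]
        have hhit : ccbinHit ctx[n] = false := by
          simp only [ccbinHit, Bool.or_eq_false_iff]
          exact ⟨by simpa using h1, by simpa using h2⟩
        have hS : ccbinSpec ctx (n+1) = ccbinSpec ctx n := by
          simp only [ccbinSpec, List.getElem?_eq_getElem hn]
          rw [if_neg h1, if_neg h2]
        rw [hS]
        simp [hhit]

theorem portB_eq (ctx : List String) :
    get_existing_ccbin_alt ctx = if ctx.any ccbinHit then ccbinSpec ctx ctx.length else none := by
  have := foldB_eq ctx ctx.length (le_refl _) none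
  simpa [get_existing_ccbin_alt, List.take_of_length_le,
    (by simp [PySem.List.length_enumerate] : (PySem.List.enumerate ctx 0).length = ctx.length)] using this

-- ===== VERDICT (by name: the statement is the Claim_ definition above) =====
theorem get_existing_ccbin_spec : Claim_equal_get_existing_ccbin := by
  intro ctx _
  unfold Spec_get_existing_ccbin
  rw [portA_eq, portB_eq]
  by_cases h : ctx.any ccbinHit
  · simp [h]
  · have hfalse : ctx.any ccbinHit = false := by simpa using h
    rw [if_neg (by simp [hfalse])]
    exact ccbinSpec_none ctx ctx.length (by simpa using hfalse)
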